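-- pv_equiv track=rewrite | github.com/jumapama/SCC-Model-Solver | np_tratable_mp.py | simulate_pure_literal_elimination
-- ===== SOURCE A (Python) =====
-- def simulate_pure_literal_elimination(clauses, num_vars):
--     literals = set(lit for c in clauses for lit in c)
--     pure_literals = []
--     for var in range(1, num_vars + 1):
--         has_pos = var in literals
--         has_neg = -var in literals
--         if has_pos and not has_neg:
--             pure_literals.append(var)
--         elif has_neg and not has_pos:
--             pure_literals.append(-var)
--
--     if not pure_literals:
--         return clauses
--     return [c for c in clauses if not any(lit in pure_literals for lit in c)]
-- ===== SOURCE B (Python) =====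
-- def simulate_pure_literal_elimination(clauses, num_vars):
--     occ = {}
--     for c in clauses:
--         for lit in c:
--             occ[lit] = occ.get(lit, 0) + 1
--     return [c for c in clauses
--             if not any(1 <= abs(l) <= num_vars and occ.get(-l, 0) == 0
--                        for l in c)]
-- ===== Notes on version B (the rewrite author's own statement) =====
-- stated objective: alternative
-- what changed: B never materialises a pure-literal collection: it builds an occurrence counter of all literals in one nested pass and decides each clause directly, dropping it iff it holds a literal in range whose negation has zero occurrences, replacing A's range(1,num_vars+1) polarity scan, pure list and membership tests (and its empty-pure early return).
import Mathlib
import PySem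

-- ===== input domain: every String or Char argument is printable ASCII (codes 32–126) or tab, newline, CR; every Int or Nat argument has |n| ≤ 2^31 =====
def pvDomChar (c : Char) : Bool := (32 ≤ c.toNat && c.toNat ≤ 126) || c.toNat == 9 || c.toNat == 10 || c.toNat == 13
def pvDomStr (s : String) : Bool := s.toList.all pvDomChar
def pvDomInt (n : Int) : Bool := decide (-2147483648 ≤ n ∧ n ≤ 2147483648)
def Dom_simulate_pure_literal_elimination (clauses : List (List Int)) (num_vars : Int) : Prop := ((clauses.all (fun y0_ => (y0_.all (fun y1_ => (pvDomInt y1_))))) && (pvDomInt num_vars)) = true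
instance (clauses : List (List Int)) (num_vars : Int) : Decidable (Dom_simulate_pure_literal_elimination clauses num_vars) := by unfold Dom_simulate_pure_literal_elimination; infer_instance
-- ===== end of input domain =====

-- B builds an occurrence counter and decides each clause directly (a literal is pure iff its
-- negation has zero occurrences), never materialising A's pure-literal list; same results.

-- ===== PORT A =====
-- literals = set(lit for c in clauses for lit in c)
def pvLits (clauses : List (List Int)) : PySem.Set Int :=
  PySem.Set.ofList (clauses.flatMap (fun c => c))

-- one iteration of A's 'for var in range(1, num_vars + 1)' loop body
def pvStepA (literals : PySem.Set Int) (acc : List Int) (var : Int) : List Int :=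
  let has_pos := PySem.Set.contains literals var
  let has_neg := PySem.Set.contains literals (-var)
  if has_pos && !has_neg then acc ++ [var]
  else if has_neg && !has_pos then acc ++ [-var]
  else acc

def simulate_pure_literal_elimination (clauses : List (List Int)) (num_vars : Int) : List (List Int) :=
  let literals := pvLits clauses
  let pure_literals : List Int :=
    (PySem.List.pyRange 1 (num_vars + 1) 1).foldl (pvStepA literals) []
  if pure_literals = [] then clauses
  else clauses.filter (fun c => !(c.any (fun lit => pure_literals.contains lit)))

-- ===== PORT B =====
-- occ = {}; for c in clauses: for lit in c: occ[lit] = occ.get(lit, 0) + 1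
def pvOcc (clauses : List (List Int)) : PySem.Dict Int Int :=
  clauses.foldl (fun d c => c.foldl (fun d lit => d.insert lit (d.getD lit 0 + 1)) d) PySem.Dict.empty

-- [c for c in clauses if not any(1 <= abs(l) <= num_vars and occ.get(-l, 0) == 0 for l in c)]
def simulate_pure_literal_elimination_alt (clauses : List (List Int)) (num_vars : Int) : List (List Int) :=
  let occ := pvOcc clauses
  clauses.filter (fun c =>
    !(c.any (fun l => decide (1 ≤ |l|) && decide (|l| ≤ num_vars) && (occ.getD (-l) 0 == 0))))

-- ===== PRECONDITION & SPEC =====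
def Spec_simulate_pure_literal_elimination (clauses : List (List Int)) (num_vars : Int) (out : List (List Int)) : Prop := out = simulate_pure_literal_elimination_alt clauses num_vars
instance (clauses : List (List Int)) (num_vars : Int) (out : List (List Int)) : Decidable (Spec_simulate_pure_literal_elimination clauses num_vars out) := by unfold Spec_simulate_pure_literal_elimination; infer_instance

-- ===== CLAIM (what is proved, stated in full; the proofs are below) =====
def Claim_equal_simulate_pure_literal_elimination : Prop := ∀ (clauses : List (List Int)) (num_vars : Int), Dom_simulate_pure_literal_elimination clauses num_vars → Spec_simulate_pure_literal_elimination clauses num_vars (simulate_pure_literal_elimination clauses num_vars)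

-- ===== LEMMAS AND PROOFS =====

-- B's counter counts occurrences in the flattened clause list
lemma getD_pvOcc (clauses : List (List Int)) (k : Int) :
    (pvOcc clauses).getD k 0 = ((clauses.flatMap (fun c => c)).count k : Int) := by
  suffices h : ∀ (cls : List (List Int)) (d : PySem.Dict Int Int),
      (cls.foldl (fun d c => c.foldl (fun d lit => d.insert lit (d.getD lit 0 + 1)) d) d).getD k 0
        = d.getD k 0 + ((cls.flatMap (fun c => c)).count k : Int) by
    simpa [pvOcc] using h clauses PySem.Dict.empty
  intro cls
  induction cls with
  | nil => simp
  | cons c t ih =>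
    intro d
    simp only [List.foldl_cons, ih, PySem.Dict.getD_foldl_insert_add_one, List.flatMap_cons,
      List.count_append]
    push_cast
    ring

-- the counter reads 0 exactly on literals that never occur
lemma getD_pvOcc_eq_zero_iff (clauses : List (List Int)) (k : Int) :
    (pvOcc clauses).getD k 0 = 0 ↔ k ∉ clauses.flatMap (fun c => c) := by
  rw [getD_pvOcc]
  simp [List.count_eq_zero]

-- membership in A's pure_literals accumulator, over any list of variables
lemma mem_foldl_pvStepA (L : PySem.Set Int) (vars : List Int) (acc : List Int) (x : Int) :
    x ∈ vars.foldl (pvStepA L) acc ↔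
      x ∈ acc ∨ ∃ v ∈ vars,
        (v ∈ L ∧ -v ∉ L ∧ x = v) ∨ (-v ∈ L ∧ v ∉ L ∧ x = -v) := by
  induction vars generalizing acc with
  | nil => simp
  | cons v t ih =>
    simp only [List.foldl_cons, ih, pvStepA]
    by_cases hp : v ∈ L <;> by_cases hn : -v ∈ L <;>
      simp [hp, hn, List.mem_append, or_assoc]

-- characterisation of A's pure_literals list
lemma mem_pureA_iff (clauses : List (List Int)) (num_vars : Int) (x : Int) :
    x ∈ (PySem.List.pyRange 1 (num_vars + 1) 1).foldl (pvStepA (pvLits clauses)) [] ↔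
      x ∈ pvLits clauses ∧ 1 ≤ |x| ∧ |x| ≤ num_vars ∧ -x ∉ pvLits clauses := by
  rw [mem_foldl_pvStepA]
  simp only [List.not_mem_nil, false_or, PySem.List.mem_pyRange_one]
  constructor
  · rintro ⟨v, ⟨h1, h2⟩, ⟨hp, hn, rfl⟩ | ⟨hn, hp, rfl⟩⟩
    · exact ⟨hp, by rw [Int.abs_eq_natAbs]; omega, by rw [Int.abs_eq_natAbs]; omega, hn⟩
    · exact ⟨hn, by rw [Int.abs_eq_natAbs]; omega, by rw [Int.abs_eq_natAbs]; omega, by simpa using hp⟩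
  · rintro ⟨hx, h1, h2, hneg⟩
    rw [Int.abs_eq_natAbs] at h1 h2
    by_cases hx0 : 0 ≤ x
    · exact ⟨x, ⟨by omega, by omega⟩, Or.inl ⟨hx, hneg, rfl⟩⟩
    · exact ⟨-x, ⟨by omega, by omega⟩, Or.inr ⟨by simpa using hx, by simpa using hneg, by simp⟩⟩

-- B's per-literal test, for a literal occurring in some clause of the input,
-- is exactly membership in A's pure_literals list
lemma predB_iff_mem_pureA (clauses : List (List Int)) (num_vars : Int) (l : Int)
    (hl : l ∈ clauses.flatMap (fun c => c)) :
    ((decide (1 ≤ |l|) && decide (|l| ≤ num_vars) && ((pvOcc clauses).getD (-l) 0 == 0)) = true) ↔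
      l ∈ (PySem.List.pyRange 1 (num_vars + 1) 1).foldl (pvStepA (pvLits clauses)) [] := by
  rw [mem_pureA_iff]
  simp only [Bool.and_eq_true, decide_eq_true_eq, beq_iff_eq, getD_pvOcc_eq_zero_iff]
  constructor
  · rintro ⟨⟨h1, h2⟩, hneg⟩
    refine ⟨by simpa [pvLits, PySem.Set.mem_ofList] using hl, h1, h2, ?_⟩
    simpa [pvLits, PySem.Set.mem_ofList] using hneg
  · rintro ⟨_, h1, h2, hneg⟩
    exact ⟨⟨h1, h2⟩, by simpa [pvLits, PySem.Set.mem_ofList] using hneg⟩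

-- ===== VERDICT (by name: the statement is the Claim_ definition above) =====
theorem simulate_pure_literal_elimination_spec : Claim_equal_simulate_pure_literal_elimination := by
  intro clauses num_vars _
  unfold Spec_simulate_pure_literal_elimination
  unfold simulate_pure_literal_elimination simulate_pure_literal_elimination_alt
  simp only []
  by_cases h : (PySem.List.pyRange 1 (num_vars + 1) 1).foldl (pvStepA (pvLits clauses)) [] = []
  · rw [if_pos h]
    symm
    apply List.filter_eq_self.mpr
    intro c hc
    simp only [Bool.not_eq_eq_eq_not, Bool.not_true, List.any_eq_false]
    intro l hl
    have hmem : l ∈ clauses.flatMap (fun c => c) := List.mem_flatMap.mpr ⟨c, hc, hl⟩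
    intro hpred
    have := (predB_iff_mem_pureA clauses num_vars l hmem).mp hpred
    rw [h] at this
    exact absurd this (List.not_mem_nil)
  · rw [if_neg h]
    apply List.filter_congr
    intro c hc
    congr 1
    apply Bool.eq_iff_iff.mpr
    simp only [List.any_eq_true]
    constructor <;> rintro ⟨l, hl, hm⟩ <;> refine ⟨l, hl, ?_⟩ <;>
      have hmem : l ∈ clauses.flatMap (fun c => c) := List.mem_flatMap.mpr ⟨c, hc, hl⟩
    · exact (predB_iff_mem_pureA clauses num_vars l hmem).mpr
        (by simpa [List.contains_eq_mem] using hm)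
    · simpa [List.contains_eq_mem] using (predB_iff_mem_pureA clauses num_vars l hmem).mp hm
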